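-- pv_equiv track=rewrite | github.com/lightbug-io/toit-lightbug | tools/bitmap_toit.py | _format_toit
-- ===== SOURCE A (Python) =====
-- from typing import Sequence
--
-- def _format_toit(
--     name: str,
--     width: int,
--     height: int,
--     values: Sequence[int],
--     per_line: int,
--     header_comments: list[str] | None = None,
-- ) -> str:
--     lines: list[str] = []
--     if header_comments:
--         lines.extend(header_comments)
--     comment = f"// {name.replace('-', ' ').title()} ({width}x{height})"
--     lines.append(comment)
--     lines.append(f"{name}-WIDTH := {width}")
--     lines.append(f"{name}-HEIGHT := {height}")
--     lines.append(f"{name}-DATA := #[")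
--
--     hex_values = [f"0X{value:02X}" for value in values]
--     for idx in range(0, len(hex_values), per_line):
--         chunk = hex_values[idx : idx + per_line]
--         line = "  " + ",".join(chunk)
--         if idx + per_line < len(hex_values):
--             line += ","
--         lines.append(line)
--
--     lines.append("]")
--     return "\n".join(lines)
-- ===== SOURCE B (Python) =====
-- def _format_toit(
--     name,
--     width,
--     height,
--     values,
--     per_line,
--     header_comments=None,
-- ):
--     def hex2(v):
--         return f"0X{v:02X}"
--
--     def data_lines(vals):
--         # recursive splitter: peel one row of at most per_line values off the
--         # front; the tail decides whether the row needs a trailing comma.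
--         # (a non-positive row width can make no rows; the guard also makes the
--         # recursion terminate)
--         if not vals or per_line <= 0:
--             return []
--         row = "  " + ",".join(hex2(v) for v in vals[:per_line])
--         rest = vals[per_line:]
--         if not rest:
--             return [row]
--         return [row + ","] + data_lines(rest)
--
--     head = list(header_comments or [])
--     head.append(f"// {name.replace('-', ' ').title()} ({width}x{height})")
--     head.append(f"{name}-WIDTH := {width}")
--     head.append(f"{name}-HEIGHT := {height}")
--     head.append(f"{name}-DATA := #[")
--     return "\n".join(head + data_lines(list(values)) + ["]"])
-- ===== Notes on version B (the rewrite author's own statement) =====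
-- stated objective: alternative
-- what changed: B replaces A's loop over chunk-start indices (range(0, len, per_line) with slices and an 'idx + per_line < len' comparison for the trailing comma) by a recursive splitter that peels one row of values off the front of the list and keys the trailing comma on whether the remaining tail is empty.
import Mathlib
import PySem

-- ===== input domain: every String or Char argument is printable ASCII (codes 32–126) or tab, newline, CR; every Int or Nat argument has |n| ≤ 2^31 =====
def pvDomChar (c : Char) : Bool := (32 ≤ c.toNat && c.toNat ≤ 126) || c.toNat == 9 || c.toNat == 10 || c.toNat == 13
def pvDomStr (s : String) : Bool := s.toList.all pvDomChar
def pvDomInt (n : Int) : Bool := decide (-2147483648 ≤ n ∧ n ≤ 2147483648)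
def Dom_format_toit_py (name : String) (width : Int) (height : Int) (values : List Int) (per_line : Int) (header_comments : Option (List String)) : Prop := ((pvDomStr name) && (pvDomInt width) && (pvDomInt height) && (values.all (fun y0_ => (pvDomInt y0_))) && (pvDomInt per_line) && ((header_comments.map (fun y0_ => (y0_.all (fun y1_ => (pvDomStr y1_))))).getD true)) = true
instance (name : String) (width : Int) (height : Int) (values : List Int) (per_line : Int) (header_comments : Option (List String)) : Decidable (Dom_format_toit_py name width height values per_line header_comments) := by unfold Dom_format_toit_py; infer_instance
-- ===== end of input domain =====

-- B replaces A's loop over chunk-start indices (range/slice with an 'idx + per_line < len'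
-- comparison for the trailing comma) by a recursive splitter that peels one row of values off
-- the front of the list and keys the trailing comma on whether the remaining tail is empty;
-- same output, objective: alternative.

-- ===== PORT A =====
-- shared formatting helpers (the f-string pieces both Pythons use verbatim)
-- hand-written port of one hex digit of Python's 'X' format (exact: 0-9 then A-F)
def pvHexDigit (n : Nat) : Char := if n < 10 then Char.ofNat (48 + n) else Char.ofNat (55 + n)
-- hand-written port of format(n,'X') digits for n > 0, most significant first (exact on Nat)
def pvHexChars : Nat → List Char
  | 0 => []
  | n + 1 => pvHexChars ((n + 1) / 16) ++ [pvHexDigit ((n + 1) % 16)]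
decreasing_by exact Nat.div_lt_self (Nat.succ_pos n) (by norm_num)
-- hand-written port of f"{v:02X}" (exact: sign, hex digits, sign-aware zero pad to width 2)
def pvHex02X (v : Int) : List Char :=
  PySem.Chars.zfill
    (if v = 0 then ['0'] else if v < 0 then '-' :: pvHexChars v.natAbs else pvHexChars v.natAbs) 2
-- f"0X{v:02X}", used by both Pythons' comprehensions
def pvHex2 (v : Int) : String := String.ofList ('0' :: 'X' :: pvHex02X v)
-- hand-written port of str.title (exact on the ASCII domain: a letter is uppercased after a
-- non-letter and lowercased after a letter; prev = was the previous character a letter)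
def pvTitle : List Char → Bool → List Char
  | [], _ => []
  | c :: rest, prev =>
    (if PySem.Chars.isalpha c then
        (if prev then PySem.Chars.lowerChar c else PySem.Chars.upperChar c)
      else c) :: pvTitle rest (PySem.Chars.isalpha c)

def format_toit_py (name : String) (width : Int) (height : Int) (values : List Int) (per_line : Int) (header_comments : Option (List String)) : String :=
  -- lines = []; if header_comments: lines.extend(header_comments)
  let lines0 : List String := match header_comments with
    | some hc => hc
    | none => []
  let comment : String :=
    "// " ++ String.ofList (pvTitle ((PySem.Str.replace name "-" " ").toList) false)
      ++ " (" ++ PySem.Int.toStr width ++ "x" ++ PySem.Int.toStr height ++ ")"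
  let lines1 : List String := lines0 ++
    [comment,
     name ++ "-WIDTH := " ++ PySem.Int.toStr width,
     name ++ "-HEIGHT := " ++ PySem.Int.toStr height,
     name ++ "-DATA := #["]
  let hex_values : List String := values.map pvHex2
  let n : Int := PySem.List.len hex_values
  let lines2 : List String := (PySem.List.pyRange 0 n per_line).foldl (fun acc idx =>
    let chunk := PySem.List.slice hex_values (some idx) (some (idx + per_line))
    let line := "  " ++ PySem.Str.join "," chunk
    let line2 := if idx + per_line < n then line ++ "," else line
    acc ++ [line2]) lines1
  PySem.Str.join "\n" (lines2 ++ ["]"])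

-- ===== PORT B =====
-- termination fact cited by pvDataLines' decreasing_by: the tail vals[per_line:] is shorter
theorem pv_rest_length_lt (p : Int) (vals : List Int) (h1 : ¬(vals = [] ∨ p ≤ 0)) :
    (PySem.List.slice vals (some p) none).length < vals.length := by
  obtain ⟨hv, hp⟩ := not_or.mp h1
  replace hp : 0 < p := lt_of_not_ge fun h => hp (by omega)
  rw [PySem.List.slice_from vals hp.le, List.length_drop]
  have h2 : 1 ≤ p.toNat := by omega
  have h3 : vals.length ≠ 0 := by simpa using hv
  omega

-- B's recursive data_lines: peel one row off the front; tail decides the trailing comma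
def pvDataLines (p : Int) (vals : List Int) : List String :=
  if h : vals = [] ∨ p ≤ 0 then []
  else
    if PySem.List.slice vals (some p) none = [] then
      ["  " ++ PySem.Str.join "," ((PySem.List.slice vals none (some p)).map pvHex2)]
    else
      ("  " ++ PySem.Str.join "," ((PySem.List.slice vals none (some p)).map pvHex2) ++ ",") ::
        pvDataLines p (PySem.List.slice vals (some p) none)
termination_by vals.length
decreasing_by exact pv_rest_length_lt p vals h

def format_toit_py_alt (name : String) (width : Int) (height : Int) (values : List Int) (per_line : Int) (header_comments : Option (List String)) : String :=
  -- head = list(header_comments or [])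
  let head0 : List String := match header_comments with
    | some hc => hc
    | none => []
  let head : List String := head0 ++
    ["// " ++ String.ofList (pvTitle ((PySem.Str.replace name "-" " ").toList) false)
       ++ " (" ++ PySem.Int.toStr width ++ "x" ++ PySem.Int.toStr height ++ ")",
     name ++ "-WIDTH := " ++ PySem.Int.toStr width,
     name ++ "-HEIGHT := " ++ PySem.Int.toStr height,
     name ++ "-DATA := #["]
  PySem.Str.join "\n" ((head ++ pvDataLines per_line values) ++ ["]"])

-- ===== PRECONDITION & SPEC =====
-- Pre_ excludes exactly per_line = 0, on which Python's range(0, len, 0) raises ValueError.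
def Pre_format_toit_py (name : String) (width : Int) (height : Int) (values : List Int) (per_line : Int) (header_comments : Option (List String)) : Prop := per_line ≠ 0
instance (name : String) (width : Int) (height : Int) (values : List Int) (per_line : Int) (header_comments : Option (List String)) : Decidable (Pre_format_toit_py name width height values per_line header_comments) := by unfold Pre_format_toit_py; infer_instance
def pvWitness_format_toit_py : String × Int × Int × List Int × Int × Option (List String) :=
  ("my-icon", 3, 2, [0, 15, 255], 2, some ["// header"])

def Spec_format_toit_py (name : String) (width : Int) (height : Int) (values : List Int) (per_line : Int) (header_comments : Option (List String)) (out : String) : Prop := out = format_toit_py_alt name width height values per_line header_comments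
instance (name : String) (width : Int) (height : Int) (values : List Int) (per_line : Int) (header_comments : Option (List String)) (out : String) : Decidable (Spec_format_toit_py name width height values per_line header_comments out) := by unfold Spec_format_toit_py; infer_instance

-- ===== CLAIM (what is proved, stated in full; the proofs are below) =====
def Claim_equal_format_toit_py : Prop := ∀ (name : String) (width : Int) (height : Int) (values : List Int) (per_line : Int) (header_comments : Option (List String)), Dom_format_toit_py name width height values per_line header_comments → Pre_format_toit_py name width height values per_line header_comments → Spec_format_toit_py name width height values per_line header_comments (format_toit_py name width height values per_line header_comments)

-- ===== LEMMAS AND PROOFS =====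

theorem pv_witness_ok :
    Dom_format_toit_py (pvWitness_format_toit_py.1) (pvWitness_format_toit_py.2.1) (pvWitness_format_toit_py.2.2.1) (pvWitness_format_toit_py.2.2.2.1) (pvWitness_format_toit_py.2.2.2.2.1) (pvWitness_format_toit_py.2.2.2.2.2) ∧
    Pre_format_toit_py (pvWitness_format_toit_py.1) (pvWitness_format_toit_py.2.1) (pvWitness_format_toit_py.2.2.1) (pvWitness_format_toit_py.2.2.2.1) (pvWitness_format_toit_py.2.2.2.2.1) (pvWitness_format_toit_py.2.2.2.2.2) := by
  constructor <;> decide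

-- A's chunk slice, read on the underlying value list: hex[i:i+p] = map of (drop, then take)
theorem pv_chunk_slice (vals : List Int) (p i : Int) (hi : 0 ≤ i) (hp : 0 ≤ p) :
    PySem.List.slice (vals.map pvHex2) (some i) (some (i + p)) =
      ((vals.drop i.toNat).take p.toNat).map pvHex2 := by
  rw [PySem.List.slice_toNat _ hi (by omega), show (i + p).toNat - i.toNat = p.toNat by omega]
  simp [List.map_take, List.map_drop]

theorem pv_pyRange_empty_of_nonpos_stop (n p : Int) (hn : 0 ≤ n) (hp : p < 0) :
    PySem.List.pyRange 0 n p = [] := by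
  simp only [PySem.List.pyRange]
  rw [if_neg (by omega), if_neg (by omega), if_neg (by omega)]
  simp

-- the core equivalence: A's per-index chunk lines = B's recursive splitter (positive row width)
theorem pv_lines_eq (p : Int) (hp : 0 < p) (vals : List Int) :
    (PySem.List.pyRange 0 (PySem.List.len (vals.map pvHex2)) p).map
      (fun idx =>
        if idx + p < PySem.List.len (vals.map pvHex2) then
          "  " ++ PySem.Str.join "," (PySem.List.slice (vals.map pvHex2) (some idx) (some (idx + p))) ++ ","
        else
          "  " ++ PySem.Str.join "," (PySem.List.slice (vals.map pvHex2) (some idx) (some (idx + p)))) =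
    pvDataLines p vals := by
  suffices H : ∀ (L : Nat) (vals : List Int), vals.length = L →
      (PySem.List.pyRange 0 (PySem.List.len (vals.map pvHex2)) p).map
        (fun idx =>
          if idx + p < PySem.List.len (vals.map pvHex2) then
            "  " ++ PySem.Str.join "," (PySem.List.slice (vals.map pvHex2) (some idx) (some (idx + p))) ++ ","
          else
            "  " ++ PySem.Str.join "," (PySem.List.slice (vals.map pvHex2) (some idx) (some (idx + p)))) =
      pvDataLines p vals from H vals.length vals rfl
  intro L
  induction L using Nat.strong_induction_on with
  | _ L ih =>
    intro vals hL
    subst hL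
    simp only [PySem.List.len, List.length_map]
    by_cases hv : vals = []
    · subst hv
      rw [PySem.List.pyRange_of_pos 0 _ hp, pvDataLines, dif_pos (Or.inl rfl)]
      simp
    · have hm : 0 < vals.length := List.length_pos_iff.mpr hv
      have hq1 : 1 ≤ p.toNat := by omega
      have hqp : (p.toNat : Int) = p := Int.toNat_of_nonneg hp.le
      rw [PySem.List.pyRange_of_pos 0 _ hp, if_pos (by exact_mod_cast hm)]
      rw [pvDataLines, dif_neg (by push Not; exact ⟨hv, hp⟩), PySem.List.slice_from vals hp.le,
        PySem.List.slice_to vals hp.le]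
      by_cases hs : vals.length ≤ p.toNat
      · -- one row: the tail vals[per_line:] is empty
        have hcnt : (((vals.length : Int) - 0 + p - 1) / p).toNat = 1 := by
          have e1 : ((vals.length : Int) - 0 + p - 1) = ((vals.length : Int) - 1) + 1 * p := by ring
          have e2 : ((vals.length : Int) - 1) / p = 0 :=
            Int.ediv_eq_zero_of_lt (by omega) (by omega)
          rw [e1, Int.add_mul_ediv_right _ _ hp.ne', e2]
          rfl
        rw [hcnt, List.range_one, if_pos (List.drop_eq_nil_of_le hs)]
        simp only [List.map_cons, List.map_nil]
        rw [show (0 : Int) + p * ((0 : Nat) : Int) = 0 by simp, if_neg (by omega),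
          pv_chunk_slice vals p 0 le_rfl hp.le]
        simp
      · -- more than one row: head row, then recurse on the tail
        have hlt : p.toNat < vals.length := not_le.mp hs
        have hcast : ((vals.length - p.toNat : Nat) : Int) = (vals.length : Int) - p := by
          omega
        have hc0 : 0 ≤ (((vals.length - p.toNat : Nat) : Int) - 0 + p - 1) / p :=
          Int.ediv_nonneg (by omega) hp.le
        have hcnt : (((vals.length : Int) - 0 + p - 1) / p).toNat =
            ((((vals.length - p.toNat : Nat) : Int) - 0 + p - 1) / p).toNat + 1 := by
          have e1 : ((vals.length : Int) - 0 + p - 1) =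
              ((((vals.length - p.toNat : Nat) : Int)) - 0 + p - 1) + 1 * p := by
            rw [hcast]; ring
          have e2 := Int.add_mul_ediv_right ((((vals.length - p.toNat : Nat) : Int)) - 0 + p - 1) 1 hp.ne'
          rw [e1, e2]
          omega
        have hrest : vals.drop p.toNat ≠ [] := by
          have : (vals.drop p.toNat).length = vals.length - p.toNat := List.length_drop
          intro hcon
          rw [hcon] at this
          simp at this
          omega
        rw [hcnt, if_neg hrest, List.range_succ_eq_map]
        simp only [List.map_cons, List.map_map]
        congr 1
        · -- head row carries the comma: the tail is nonempty
          rw [show (0 : Int) + p * ((0 : Nat) : Int) = 0 by simp, if_pos (by omega),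
            pv_chunk_slice vals p 0 le_rfl hp.le]
          simp
        · -- tail = A's lines on the rest, which are B's lines by induction
          have hlen : (vals.drop p.toNat).length = vals.length - p.toNat := List.length_drop
          rw [← ih (vals.length - p.toNat) (by omega) (vals.drop p.toNat) hlen]
          simp only [PySem.List.len, List.length_map, hlen]
          rw [PySem.List.pyRange_of_pos 0 _ hp, if_pos (by omega), List.map_map]
          apply List.map_congr_left
          intro k hk
          simp only [Function.comp_apply, zero_add]
          have ha1 : 0 ≤ p * ((Nat.succ k : Nat) : Int) := by positivity
          have ha2 : 0 ≤ p * ((k : Nat) : Int) := by positivity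
          rw [pv_chunk_slice vals p _ ha1 hp.le, pv_chunk_slice (vals.drop p.toNat) p _ ha2 hp.le]
          have ht1 : (p * ((Nat.succ k : Nat) : Int)).toNat = p.toNat * (k + 1) := by
            have : p * ((Nat.succ k : Nat) : Int) = ((p.toNat * (k + 1) : Nat) : Int) := by
              push_cast; rw [hqp]; try ring
            rw [this, Int.toNat_natCast]
          have ht2 : (p * ((k : Nat) : Int)).toNat = p.toNat * k := by
            have : p * ((k : Nat) : Int) = ((p.toNat * k : Nat) : Int) := by
              push_cast; rw [hqp]
            rw [this, Int.toNat_natCast]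
          have hdr : vals.drop (p * ((Nat.succ k : Nat) : Int)).toNat =
              (vals.drop p.toNat).drop (p * ((k : Nat) : Int)).toNat := by
            rw [ht1, ht2, List.drop_drop, Nat.mul_succ]
            ring_nf
          have hcond : (p * ((Nat.succ k : Nat) : Int) + p < (vals.length : Int)) ↔
              (p * ((k : Nat) : Int) + p < ((vals.length - p.toNat : Nat) : Int)) := by
            have hm1 : p * ((Nat.succ k : Nat) : Int) = p * ((k : Nat) : Int) + p := by
              push_cast; ring
            rw [hm1, hcast]
            omega
          rw [hdr]
          by_cases hc : p * ((k : Nat) : Int) + p < ((vals.length - p.toNat : Nat) : Int)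
          · rw [if_pos (hcond.mpr hc), if_pos hc]
          · rw [if_neg (fun h => hc (hcond.mp h)), if_neg hc]

-- ===== VERDICT (by name: the statement is the Claim_ definition above) =====
theorem format_toit_py_spec : Claim_equal_format_toit_py := by
  intro name width height values per_line header_comments _ hpre
  unfold Spec_format_toit_py format_toit_py format_toit_py_alt
  dsimp only
  rw [PySem.List.foldl_append_singleton_eq_map]
  have key : (PySem.List.pyRange 0 (PySem.List.len (values.map pvHex2)) per_line).map
      (fun idx =>
        if idx + per_line < PySem.List.len (values.map pvHex2) then
          "  " ++ PySem.Str.join "," (PySem.List.slice (values.map pvHex2) (some idx) (some (idx + per_line))) ++ ","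
        else
          "  " ++ PySem.Str.join "," (PySem.List.slice (values.map pvHex2) (some idx) (some (idx + per_line)))) =
      pvDataLines per_line values := by
    rcases lt_or_gt_of_ne hpre with hneg | hpos
    · rw [pv_pyRange_empty_of_nonpos_stop _ _ (by simp [PySem.List.len]) hneg]
      rw [pvDataLines]
      rw [dif_pos (Or.inr hneg.le)]
      simp
    · exact pv_lines_eq per_line hpos values
  rw [key, List.append_assoc]
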